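-- pv_equiv track=rewrite | github.com/sebacaccaro/tesi_magistrale | Valutazione/valutazione.py | bitMaskToPos
-- ===== SOURCE A (Python) =====
-- def bitMaskToPos(bitmask):
--     ranges = []
--     current = []
--     for i in range(len(bitmask)):
--         value = bitmask[i]
--         if value == 0:
--             if len(current) > 0:
--                 ranges.append(current)
--                 current = []
--         elif value == 1:
--             current.append(i)
--     if len(current) > 0:
--         ranges.append(current)
--     return ranges
-- ===== SOURCE B (Python) =====
-- def bitMaskToPos(bitmask):
--     # Phase 1: key each position by the number of zeros before it.
--     z, keys = 0, []
--     for v in bitmask: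
--         keys.append(z)
--         if v == 0:
--             z += 1
--     # Phase 2: group the positions holding exactly 1 by that key;
--     # two 1-positions share a run iff no zero lies between them,
--     # i.e. iff they have the same prefix-zero count.
--     groups = {}
--     for k, (i, v) in zip(keys, enumerate(bitmask)):
--         if v == 1:
--             groups.setdefault(k, []).append(i)
--     return list(groups.values())
-- ===== Notes on version B (the rewrite author's own statement) =====
-- stated objective: alternative
-- what changed: Replaces A's single-pass run accumulator (current/ranges with explicit flushes on zeros) by a two-phase key-and-group algorithm: first compute each position's prefix-zero count, then group the positions holding exactly 1 into an insertion-ordered dict keyed by that count (two 1-positions are in the same run iff they have equal prefix-zero counts), returning the dict's values.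
import Mathlib
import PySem

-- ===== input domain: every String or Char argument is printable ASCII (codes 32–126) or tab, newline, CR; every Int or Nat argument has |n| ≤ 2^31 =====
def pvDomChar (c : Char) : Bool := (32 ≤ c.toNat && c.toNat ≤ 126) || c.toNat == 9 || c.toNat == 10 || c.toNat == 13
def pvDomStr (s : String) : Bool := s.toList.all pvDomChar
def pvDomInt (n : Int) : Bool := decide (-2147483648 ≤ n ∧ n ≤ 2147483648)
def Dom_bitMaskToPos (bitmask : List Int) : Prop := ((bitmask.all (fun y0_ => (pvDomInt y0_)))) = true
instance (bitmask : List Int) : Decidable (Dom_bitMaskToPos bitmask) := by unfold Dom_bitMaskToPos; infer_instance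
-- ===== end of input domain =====

-- B replaces A's run-accumulator loop by a two-phase key-and-group algorithm
-- (prefix-zero-count keys, then dict grouping); objective: alternative, same cost.

-- ===== PORT A =====
-- A's 'for i in range(len(bitmask)): value = bitmask[i]' walks (index, value) pairs with the
-- index always in range, ported as structural recursion over PySem.List.enumerate (exact here).
-- State (ranges, current): value == 0 flushes a non-empty current, value == 1 appends i.
def bmGoA : List (Int × Int) → List (List Int) → List Int → List (List Int)
  | [], ranges, current => if current.length > 0 then ranges ++ [current] else ranges
  | (i, v) :: rest, ranges, current =>
      if v == 0 then
        if current.length > 0 then bmGoA rest (ranges ++ [current]) [] else bmGoA rest ranges current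
      else if v == 1 then bmGoA rest ranges (current ++ [i])
      else bmGoA rest ranges current

def bitMaskToPos (bitmask : List Int) : List (List Int) :=
  bmGoA (PySem.List.enumerate bitmask) [] []

-- ===== PORT B =====
-- Phase 1 of Source B: keys.append(z); z += 1 on zeros.
def bmKeys : List Int → Int → List Int
  | [], _ => []
  | v :: rest, z => z :: bmKeys rest (if v == 0 then z + 1 else z)

-- Phase 2 of Source B: groups.setdefault(k, []).append(i), i.e. d[k] = d.get(k, []) ++ [i] — Dict.modify.
def bmGroups : List (Int × Int × Int) → PySem.Dict Int (List Int) → PySem.Dict Int (List Int)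
  | [], d => d
  | (k, i, v) :: rest, d =>
      if v == 1 then bmGroups rest (d.modify k [] (· ++ [i])) else bmGroups rest d

def bitMaskToPos_alt (bitmask : List Int) : List (List Int) :=
  (bmGroups ((bmKeys bitmask 0).zip (PySem.List.enumerate bitmask)) PySem.Dict.empty).values

-- ===== PRECONDITION & SPEC =====
def Spec_bitMaskToPos (bitmask : List Int) (out : List (List Int)) : Prop := out = bitMaskToPos_alt bitmask
instance (bitmask : List Int) (out : List (List Int)) : Decidable (Spec_bitMaskToPos bitmask out) := by unfold Spec_bitMaskToPos; infer_instance

-- ===== CLAIM (what is proved, stated in full; the proofs are below) =====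
def Claim_equal_bitMaskToPos : Prop := ∀ (bitmask : List Int), Dom_bitMaskToPos bitmask → Spec_bitMaskToPos bitmask (bitMaskToPos bitmask)

-- ===== LEMMAS AND PROOFS =====

-- The joint invariant: A's state (ranges, current) against B's state (z, d).
-- Either no run is open and d's values are exactly ranges with all keys below z,
-- or a run 'current' is open and it sits as the last entry of d under key z.
theorem bm_main (rest : List Int) (i z : Int) (ranges : List (List Int)) (current : List Int)
    (d : PySem.Dict Int (List Int)) (hnd : d.keys.Nodup)
    (hinv : (current = [] ∧ d.values = ranges ∧ ∀ k ∈ d.keys, k < z)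
          ∨ (current ≠ [] ∧ ∃ P, d.items = P ++ [(z, current)] ∧ P.map (·.2) = ranges ∧
              ∀ k ∈ P.map (·.1), k < z)) :
    bmGoA (PySem.List.enumerate rest i) ranges current =
      (bmGroups ((bmKeys rest z).zip (PySem.List.enumerate rest i)) d).values := by
  induction rest generalizing i z ranges current d with
  | nil =>
    simp only [PySem.List.enumerate_nil, bmKeys, List.zip_nil_left, bmGoA, bmGroups]
    rcases hinv with ⟨hc, hv, _⟩ | ⟨hc, P, hitems, hP, _⟩
    · subst hc; simp [hv]
    · rw [if_pos (by rcases current with _ | _ <;> simp_all)]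
      simp [PySem.Dict.values, hitems, hP]
  | cons v rest ih =>
    simp only [PySem.List.enumerate_cons, bmKeys, List.zip_cons_cons, bmGoA, bmGroups]
    by_cases hv0 : v = 0
    · subst hv0
      simp only [beq_self_eq_true, if_true]
      rcases hinv with ⟨hc, hv, hlt⟩ | ⟨hc, P, hitems, hP, hlt⟩
      · subst hc
        simp only [List.length_nil, gt_iff_lt, lt_self_iff_false, if_false]
        exact ih (i + 1) (z + 1) ranges [] d hnd
          (Or.inl ⟨rfl, hv, fun k hk => lt_trans (hlt k hk) (by omega)⟩)
      · rw [if_pos (by rcases current with _ | _ <;> simp_all)]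
        refine ih (i + 1) (z + 1) (ranges ++ [current]) [] d hnd (Or.inl ⟨rfl, ?_, ?_⟩)
        · simp [PySem.Dict.values, hitems, hP]
        · intro k hk
          simp only [PySem.Dict.keys, hitems, List.map_append, List.mem_append] at hk
          rcases hk with hk | hk
          · exact lt_trans (hlt k hk) (by omega)
          · simp at hk; omega
    · have h0 : (v == 0) = false := by simp [hv0]
      rw [h0]
      simp only [Bool.false_eq_true, if_false]
      by_cases hv1 : v = 1
      · subst hv1
        simp only [beq_self_eq_true, if_true]
        rcases hinv with ⟨hc, hvv, hlt⟩ | ⟨hc, P, hitems, hP, hlt⟩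
        · -- open a fresh run: key z not yet in d, modify appends (z, [i])
          subst hc
          have hnc : d.contains z = false := by
            rw [PySem.Dict.contains_eq_decide_mem_keys]
            simp only [decide_eq_false_iff_not]
            intro hm; exact absurd (hlt z hm) (lt_irrefl z)
          have hmod : (d.modify z [] (· ++ [i])).items = d.items ++ [(z, [i])] := by
            simp [PySem.Dict.modify, PySem.Dict.getD_of_not_contains d [] hnc,
              PySem.Dict.items_insert_of_not_contains d _ hnc]
          refine ih (i + 1) z ranges ([] ++ [i]) (d.modify z [] (· ++ [i])) ?_
            (Or.inr ⟨by simp, d.items, by simpa using hmod, hvv, hlt⟩)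
          · have : (d.modify z [] (· ++ [i])).keys = d.keys ++ [z] := by
              simp [PySem.Dict.keys, hmod]
            have hnk : z ∉ d.keys := fun hm => absurd (hlt z hm) (lt_irrefl z)
            rw [this]
            simp only [List.nodup_append, hnd, true_and]
            refine ⟨by simp, ?_⟩
            intro a ha he hme heq
            simp only [List.mem_singleton] at hme
            subst hme
            subst heq
            exact hnk ha
        · -- extend the open run: key z is the last entry, modify rewrites it in place
          have hmem : (z, current) ∈ d.items := by simp [hitems]
          have hgd : d.getD z [] = current := PySem.Dict.getD_of_mem_items d hmem hnd []
          have hct : d.contains z = true := by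
            rw [PySem.Dict.contains_eq_decide_mem_keys]
            simp only [decide_eq_true_eq]
            exact PySem.Dict.mem_keys_of_mem_items d hmem
          have hPfix : P.map (fun p : Int × List Int =>
              if (p.1 == z) = true then (z, current ++ [i]) else p) = P := by
            conv_rhs => rw [← List.map_id P]
            refine List.map_congr_left (fun p hp => ?_)
            have hplt : p.1 < z := hlt p.1 (List.mem_map_of_mem hp)
            simp [show (p.1 == z) = false by simp; omega]
          have hmod : (d.modify z [] (· ++ [i])).items = P ++ [(z, current ++ [i])] := by
            simp only [PySem.Dict.modify, hgd, PySem.Dict.items_insert_of_contains d _ hct,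
              hitems, List.map_append, hPfix]
            simp
          refine ih (i + 1) z ranges (current ++ [i]) (d.modify z [] (· ++ [i])) ?_
            (Or.inr ⟨by simp, P, hmod, hP, hlt⟩)
          · have : (d.modify z [] (· ++ [i])).keys = d.keys := by
              simp [PySem.Dict.keys, hmod, hitems]
            rw [this]; exact hnd
      · have h1 : (v == 1) = false := by simp [hv1]
        rw [h1]
        simp only [Bool.false_eq_true, if_false]
        exact ih (i + 1) z ranges current d hnd hinv

-- ===== VERDICT (by name: the statement is the Claim_ definition above) =====
theorem bitMaskToPos_spec : Claim_equal_bitMaskToPos := by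
  intro bitmask _
  unfold Spec_bitMaskToPos bitMaskToPos bitMaskToPos_alt
  exact bm_main bitmask 0 0 [] [] PySem.Dict.empty (by simp [PySem.Dict.keys, PySem.Dict.empty])
    (Or.inl ⟨rfl, by simp [PySem.Dict.values, PySem.Dict.empty], by simp [PySem.Dict.keys, PySem.Dict.empty]⟩)
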